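-- pv_equiv track=rewrite | github.com/mmcguffi/finding_DNA_repeats | repeat_finder.py | create_lcparray
-- ===== SOURCE A (Python) =====
-- from operator import itemgetter
--
-- def create_lcparray(in_str, repeat_length):
--     """""" # @TODO: Docstring
--     suffixarray = []
--     for i in range(1, len(in_str) + 1):
--         suffixarray.append((len(in_str) - i, in_str[-i:len(in_str)]))
--     suffixarray.sort(key=itemgetter(1))
--
--     lcparray = []
--     for i in range(len(suffixarray) - 1):
--         j = 0
--         try:
--             while suffixarray[i][1][j] == suffixarray[i + 1][1][j]:
--                 j += 1
--                 if j >= repeat_length: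
--                     lcparray.append((suffixarray[i][0], j, suffixarray[i + 1][0]))
--         except IndexError:
--             pass
--
--     lcparray.sort(key=itemgetter(1), reverse=True)
--
--     return lcparray
-- ===== SOURCE B (Python) =====
-- def _lcp(u, v):
--     k = 0
--     for x, y in zip(u, v):
--         if x != y:
--             break
--         k += 1
--     return k
--
--
-- def create_lcparray(in_str, repeat_length):
--     n = len(in_str)
--     sa = sorted(range(n), key=lambda i: in_str[i:])
--     pairs = list(zip(sa, sa[1:]))
--     lcps = [_lcp(in_str[a:], in_str[b:]) for a, b in pairs]
--     lo = max(repeat_length, 1)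
--     hi = max(lcps, default=0)
--     out = []
--     for j in range(hi, lo - 1, -1):
--         for (a, b), L in zip(pairs, lcps):
--             if L >= j:
--                 out.append((a, j, b))
--     return out
-- ===== Notes on version B (the rewrite author's own statement) =====
-- stated objective: alternative
-- what changed: B sorts suffix indices instead of (index, suffix-string) pairs, computes each adjacent LCP once as a number instead of A's char-by-char while loop that appends tuples as it compares, and emits tuples by sweeping lengths from the maximum LCP downward, replacing A's final stable reverse comparison sort with a counting-style bucket emission.
import Mathlib
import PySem

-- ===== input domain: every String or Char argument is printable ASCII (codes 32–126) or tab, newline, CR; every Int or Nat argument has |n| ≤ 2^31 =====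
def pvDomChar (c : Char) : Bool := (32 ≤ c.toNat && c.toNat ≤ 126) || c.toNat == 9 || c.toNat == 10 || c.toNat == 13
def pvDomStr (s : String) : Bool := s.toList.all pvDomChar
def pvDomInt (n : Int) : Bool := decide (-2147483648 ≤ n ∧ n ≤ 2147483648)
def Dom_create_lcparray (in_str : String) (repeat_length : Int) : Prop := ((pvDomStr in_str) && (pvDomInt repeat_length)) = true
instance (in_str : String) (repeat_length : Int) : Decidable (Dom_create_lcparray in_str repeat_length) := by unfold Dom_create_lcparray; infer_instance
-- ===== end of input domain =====

-- B replaces A's sorted (index, suffix-string) pairs by a sorted index array, A's tuple-emitting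
-- char-comparison while loop by one LCP number per adjacent pair, and A's final stable reverse sort
-- by a bucket sweep over lengths from the maximum LCP downward (objective: alternative structure).

-- ===== PORT A =====
-- the inner 'j = 0; try: while suffixarray[i][1][j] == suffixarray[i+1][1][j]: j += 1; if j >= repeat_length: append' loop
def createA_while (u v : List Char) (rl a b : Int) (j : Nat) (acc : List (Int × Int × Int)) : List (Int × Int × Int) :=
  match hu : u[j]?, hv : v[j]? with
  | some cu, some cv =>
    if cu = cv then
      createA_while u v rl a b (j + 1)
        (if rl ≤ ((j + 1 : Nat) : Int) then acc ++ [(a, ((j + 1 : Nat) : Int), b)] else acc)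
    else acc
  | _, _ => acc
termination_by u.length - j
decreasing_by
  have : j < u.length := by
    have := List.getElem?_eq_some_iff.mp hu
    exact this.1
  omega

def create_lcparray (in_str : String) (repeat_length : Int) : List (Int × Int × Int) :=
  let n : Int := PySem.Str.len in_str
  let suffixarray := (PySem.List.pyRange 1 (n + 1) 1).foldl
      (fun acc i => acc ++ [(n - i, PySem.Str.slice in_str (some (-i)) (some n))]) []
  let sa := PySem.List.sorted suffixarray (fun p => p.2) false
  let lcparray := (PySem.List.pyRange 0 ((sa.length : Int) - 1) 1).foldl
      (fun acc i =>
        let p := PySem.List.pyGetD sa i (0, "")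
        let q := PySem.List.pyGetD sa (i + 1) (0, "")
        createA_while p.2.toList q.2.toList repeat_length p.1 q.1 0 acc) []
  PySem.List.sorted lcparray (fun t => t.2.1) true

-- ===== PORT B =====
-- '_lcp(u, v)': count equal leading characters of the zipped pair, stop at first mismatch
def lcpChars : List Char → List Char → Int
  | x :: u, y :: v => if x ≠ y then 0 else lcpChars u v + 1
  | _, _ => 0

def create_lcparray_alt (in_str : String) (repeat_length : Int) : List (Int × Int × Int) :=
  let n : Int := PySem.Str.len in_str
  let sa := PySem.List.sorted (PySem.List.pyRange 0 n 1)
      (fun i => PySem.Str.slice in_str (some i) none) false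
  let pairs := sa.zip (PySem.List.slice sa (some 1) none)
  let lcps := pairs.map (fun ab =>
      lcpChars (PySem.Str.slice in_str (some ab.1) none).toList
               (PySem.Str.slice in_str (some ab.2) none).toList)
  let lo := max repeat_length 1
  let hi := PySem.List.maxD lcps (fun x => x) 0
  (PySem.List.pyRange hi (lo - 1) (-1)).foldl
    (fun acc j =>
      (pairs.zip lcps).foldl
        (fun acc2 pl => if pl.2 ≥ j then acc2 ++ [(pl.1.1, j, pl.1.2)] else acc2) acc) []

-- ===== PRECONDITION & SPEC =====
def Spec_create_lcparray (in_str : String) (repeat_length : Int) (out : List (Int × Int × Int)) : Prop := out = create_lcparray_alt in_str repeat_length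
instance (in_str : String) (repeat_length : Int) (out : List (Int × Int × Int)) : Decidable (Spec_create_lcparray in_str repeat_length out) := by unfold Spec_create_lcparray; infer_instance

-- ===== CLAIM (what is proved, stated in full; the proofs are below) =====
def Claim_equal_create_lcparray : Prop := ∀ (in_str : String) (repeat_length : Int), Dom_create_lcparray in_str repeat_length → Spec_create_lcparray in_str repeat_length (create_lcparray in_str repeat_length)

-- ===== LEMMAS AND PROOFS =====

lemma lcpChars_nonneg (u v : List Char) : 0 ≤ lcpChars u v := by
  induction u generalizing v with
  | nil => simp [lcpChars]
  | cons x u ih =>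
    cases v with
    | nil => simp [lcpChars]
    | cons y v =>
      simp only [lcpChars]
      split
      · simp
      · have := ih v; omega

-- stable insertion into a split list: x goes right between the "not before" prefix and the "before" suffix
lemma insertBy_split {α : Type} (p : α → α → Bool) (x : α) (l1 l2 : List α)
    (h1 : ∀ y ∈ l1, p x y = false) (h2 : ∀ y ∈ l2, p x y = true) :
    PySem.List.insertBy p x (l1 ++ l2) = l1 ++ x :: l2 := by
  induction l1 with
  | nil =>
    cases l2 with
    | nil => rfl
    | cons z l2 => simp [PySem.List.insertBy, h2 z (by simp)]
  | cons z l1 ih =>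
    simp only [List.cons_append, PySem.List.insertBy, h1 z (by simp)]
    simp only [Bool.false_eq_true, if_false, List.cons.injEq, true_and]
    exact ih (fun y hy => h1 y (by simp [hy]))

-- Python's stable reverse sort by an Int key, described as bucket concatenation along any
-- strictly decreasing key list covering all keys
lemma sorted_rev_eq_buckets {α : Type} (key : α → Int) (xs : List α) (ks : List Int)
    (hk : ks.Pairwise (· > ·)) (hmem : ∀ x ∈ xs, key x ∈ ks) :
    PySem.List.sorted xs key true = ks.flatMap (fun k => xs.filter (fun x => decide (key x = k))) := by
  rw [PySem.List.sorted_rev_eq_foldl_insertBy]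
  induction xs using List.reverseRecOn with
  | nil => simp
  | append_singleton xs x ih =>
    rw [List.foldl_append, List.foldl_cons, List.foldl_nil]
    rw [ih (fun y hy => hmem y (by simp [hy]))]
    -- decompose ks at (key x)
    obtain ⟨k1, k2, hks⟩ := List.append_of_mem (hmem x (by simp))
    subst hks
    have hpw := hk
    rw [List.pairwise_append] at hpw
    obtain ⟨hpw1, hpw2, hcross⟩ := hpw
    rw [List.pairwise_cons] at hpw2
    obtain ⟨hgt2, _⟩ := hpw2
    have hne1 : ∀ k ∈ k1, k ≠ key x := fun k hkk => by
      have := hcross k hkk (key x) (by simp); omega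
    have hlt2 : ∀ k ∈ k2, k < key x := hgt2
    -- filters of xs ++ [x]
    have hfilter : ∀ k : Int, (xs ++ [x]).filter (fun y => decide (key y = k)) =
        xs.filter (fun y => decide (key y = k)) ++ if key x = k then [x] else [] := by
      intro k
      rw [List.filter_append]
      congr 1
      by_cases h : key x = k <;> simp [h]
    rw [List.flatMap_append, List.flatMap_cons]
    rw [List.flatMap_append, List.flatMap_cons]
    have hA1 : k1.flatMap (fun k => (xs ++ [x]).filter (fun y => decide (key y = k))) =
        k1.flatMap (fun k => xs.filter (fun y => decide (key y = k))) := by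
      apply List.flatMap_congr
      intro k hkk
      rw [hfilter k, if_neg (fun h => hne1 k hkk h.symm)]
      simp
    have hA2 : k2.flatMap (fun k => (xs ++ [x]).filter (fun y => decide (key y = k))) =
        k2.flatMap (fun k => xs.filter (fun y => decide (key y = k))) := by
      apply List.flatMap_congr
      intro k hkk
      rw [hfilter k, if_neg (by have := hlt2 k hkk; omega)]
      simp
    rw [hA1, hA2, hfilter (key x), if_pos rfl]
    set A1 := k1.flatMap (fun k => xs.filter (fun y => decide (key y = k))) with hA1d
    set A2 := k2.flatMap (fun k => xs.filter (fun y => decide (key y = k))) with hA2d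
    set Fx := xs.filter (fun y => decide (key y = key x)) with hFxd
    have := insertBy_split (fun a b => decide (key b < key a)) x (A1 ++ Fx) A2 ?_ ?_
    · rw [show A1 ++ (Fx ++ A2) = (A1 ++ Fx) ++ A2 by simp, this]
      simp
    · intro y hy
      rcases List.mem_append.mp hy with hy1 | hy2
      · obtain ⟨k, hkk, hyk⟩ := List.mem_flatMap.mp hy1
        have hky : key y = k := by simpa using (List.mem_filter.mp hyk).2
        have : k > key x := hcross k hkk (key x) (by simp)
        simp [hky]; omega
      · have hky : key y = key x := by simpa using (List.mem_filter.mp hy2).2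
        simp [hky]
    · intro y hy
      obtain ⟨k, hkk, hyk⟩ := List.mem_flatMap.mp hy
      have hky : key y = k := by simpa using (List.mem_filter.mp hyk).2
      have := hlt2 k hkk
      simp [hky]; omega

lemma filter_pyRange_one (a b j : Int) :
    (PySem.List.pyRange a b 1).filter (fun x => decide (x = j)) =
      if a ≤ j ∧ j < b then [j] else [] := by
  have H : ∀ (n : Nat) (a : Int), (b - a).toNat = n →
      (PySem.List.pyRange a b 1).filter (fun x => decide (x = j)) =
        if a ≤ j ∧ j < b then [j] else [] := by
    intro n
    induction n with
    | zero =>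
      intro a h
      rw [PySem.List.pyRange_one_eq_nil (by omega)]
      simp; omega
    | succ m ih =>
      intro a h
      rw [PySem.List.pyRange_one_cons (by omega), List.filter_cons]
      have hrec := ih (a + 1) (by omega)
      rw [hrec]
      by_cases haj : a = j
      · subst haj
        simp only [decide_true, if_pos]
        rw [if_neg (by omega), if_pos ⟨le_refl a, by omega⟩]
      · simp only [decide_eq_true_eq, haj, if_false]
        split_ifs <;> first | rfl | omega
  exact H ((b - a).toNat) a rfl

lemma filter_flatMap {α β : Type} (l : List α) (f : α → List β) (p : β → Bool) :
    (l.flatMap f).filter p = l.flatMap (fun x => (f x).filter p) := by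
  induction l with
  | nil => rfl
  | cons a l ih => simp [List.flatMap_cons, List.filter_append, ih]

lemma filter_map_eq_flatMap {α β : Type} (l : List α) (p : α → Bool) (f : α → β) :
    (l.filter p).map f = l.flatMap (fun x => if p x then [f x] else []) := by
  induction l with
  | nil => rfl
  | cons a l ih =>
    by_cases h : p a = true
    · simp [h, ih]
    · simp [h, ih]

lemma le_maxD_of_mem (xs : List Int) (x d : Int) (hx : x ∈ xs) :
    x ≤ PySem.List.maxD xs (fun y => y) d := by
  unfold PySem.List.maxD
  cases hm : PySem.List.max? xs (fun y => y) with
  | none =>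
    rw [PySem.List.max?_eq_none_iff] at hm
    subst hm; simp at hx
  | some m => simpa using PySem.List.max?_isMax hm x hx

-- characterisation of A's while loop: it emits exactly the range of lengths above the threshold
lemma whileA_eq (u v : List Char) (rl a b : Int) (j : Nat) (acc : List (Int × Int × Int)) :
    createA_while u v rl a b j acc =
      acc ++ (PySem.List.pyRange (max rl ((j : Int) + 1)) ((j : Int) + lcpChars (u.drop j) (v.drop j) + 1) 1).map
        (fun k => (a, k, b)) := by
  fun_induction createA_while u v rl a b j acc with
  | case1 j acc cu hv heq ih =>
    have hju : j < u.length := (List.getElem?_eq_some_iff.mp heq).1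
    have hjv : j < v.length := (List.getElem?_eq_some_iff.mp hv).1
    have hdu : u.drop j = cu :: u.drop (j + 1) := by
      rw [List.drop_eq_getElem_cons hju, (List.getElem?_eq_some_iff.mp heq).2]
    have hdv : v.drop j = cu :: v.drop (j + 1) := by
      rw [List.drop_eq_getElem_cons hjv, (List.getElem?_eq_some_iff.mp hv).2]
    simp only [dite_eq_ite] at ih
    rw [ih, hdu, hdv]
    simp only [lcpChars, ne_eq, not_true_eq_false, if_false]
    set L := lcpChars (u.drop (j + 1)) (v.drop (j + 1)) with hL
    have hL0 : 0 ≤ L := lcpChars_nonneg _ _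
    by_cases hrl : rl ≤ (j : Int) + 1
    · rw [if_pos (by exact_mod_cast hrl)]
      have hmax1 : max rl ((j : Int) + 1) = (j : Int) + 1 := max_eq_right hrl
      have hmax2 : max rl (((j + 1 : Nat) : Int) + 1) = (j : Int) + 2 := by
        rw [max_eq_right (by push_cast; omega)]; push_cast; ring
      have hb : ((j + 1 : Nat) : Int) + L + 1 = (j : Int) + (L + 1) + 1 := by push_cast; ring
      rw [hmax1, hmax2, hb]
      conv_rhs => rw [PySem.List.pyRange_one_cons (by omega : (j : Int) + 1 < (j : Int) + (L + 1) + 1)]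
      rw [show ((j : Int) + 1 + 1) = (j : Int) + 2 by ring]
      simp
    · rw [if_neg (by exact_mod_cast hrl)]
      have hmax1 : max rl ((j : Int) + 1) = rl := max_eq_left (by omega)
      have hmax2 : max rl (((j + 1 : Nat) : Int) + 1) = rl := max_eq_left (by push_cast; omega)
      have hb : ((j + 1 : Nat) : Int) + L + 1 = (j : Int) + (L + 1) + 1 := by push_cast; ring
      rw [hmax1, hmax2, hb]
  | case2 j acc cu cv heq hv hne =>
    have hju : j < u.length := (List.getElem?_eq_some_iff.mp heq).1
    have hjv : j < v.length := (List.getElem?_eq_some_iff.mp hv).1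
    have hdu : u.drop j = cu :: u.drop (j + 1) := by
      rw [List.drop_eq_getElem_cons hju, (List.getElem?_eq_some_iff.mp heq).2]
    have hdv : v.drop j = cv :: v.drop (j + 1) := by
      rw [List.drop_eq_getElem_cons hjv, (List.getElem?_eq_some_iff.mp hv).2]
    rw [hdu, hdv]
    simp only [lcpChars, if_pos hne]
    rw [PySem.List.pyRange_one_eq_nil (by omega)]
    simp
  | case3 j acc h =>
    have : u.drop j = [] ∨ v.drop j = [] := by
      rcases hu' : u[j]? with _ | cu
      · exact Or.inl (List.drop_eq_nil_iff.mpr (by have := List.getElem?_eq_none_iff.mp hu'; omega))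
      · rcases hv' : v[j]? with _ | cv
        · exact Or.inr (List.drop_eq_nil_iff.mpr (by have := List.getElem?_eq_none_iff.mp hv'; omega))
        · exact (h cu cv hu' hv').elim
    have hz : lcpChars (u.drop j) (v.drop j) = 0 := by
      rcases this with h1 | h1 <;> rw [h1]
      · simp [lcpChars]
      · cases u.drop j <;> simp [lcpChars]
    rw [hz, PySem.List.pyRange_one_eq_nil (by omega)]
    simp

lemma whileA_zero (u v : List Char) (rl a b : Int) (acc : List (Int × Int × Int)) :
    createA_while u v rl a b 0 acc =
      acc ++ (PySem.List.pyRange (max rl 1) (lcpChars u v + 1) 1).map (fun k => (a, k, b)) := by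
  have h := whileA_eq u v rl a b 0 acc
  simpa using h

-- an adjacent-pairs index loop is a loop over zip(l, l[1:])
lemma flatMap_pyRange_adj {α β : Type} (l : List α) (d : α) (f : α → α → List β) :
    (PySem.List.pyRange 0 ((l.length : Int) - 1) 1).flatMap
        (fun i => f (PySem.List.pyGetD l i d) (PySem.List.pyGetD l (i + 1) d)) =
      (l.zip (l.drop 1)).flatMap (fun p => f p.1 p.2) := by
  have hmap : (PySem.List.pyRange 0 ((l.length : Int) - 1) 1).map
      (fun i => (PySem.List.pyGetD l i d, PySem.List.pyGetD l (i + 1) d)) = l.zip (l.drop 1) := by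
    apply List.ext_getElem
    · simp [PySem.List.length_pyRange_one]
    · intro k hk1 hk2
      have hkl : k + 1 < l.length := by
        simp [PySem.List.length_pyRange_one] at hk1; omega
      simp only [List.getElem_map, PySem.List.getElem_pyRange_one, List.getElem_zip, List.getElem_drop]
      rw [Prod.mk.injEq]
      refine ⟨?_, ?_⟩
      · rw [show ((0:Int) + k) = ((k:Nat) : Int) by omega,
          PySem.List.pyGetD_eq_getElem l d (by omega) (by exact_mod_cast by omega)]
        simp
      · rw [show ((0:Int) + k + 1) = (((k+1:Nat)) : Int) by omega,
          PySem.List.pyGetD_eq_getElem l d (by omega) (by exact_mod_cast by omega)]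
        simp [Nat.add_comm]
  rw [← hmap, List.flatMap_map]

-- s[-i:len(s)] is the suffix starting at len(s) - i
lemma slice_neg_eq (cs : List Char) (i : Int) (h1 : 1 ≤ i) (h2 : i ≤ (cs.length : Int)) :
    PySem.List.slice cs (some (-i)) (some (cs.length : Int)) = cs.drop ((cs.length : Int) - i).toNat := by
  obtain ⟨k, rfl⟩ : ∃ k : Nat, i = (k : Int) := ⟨i.toNat, by omega⟩
  have hc : PySem.List.clampIdx cs.length (-(k : Int)) = cs.length - k := by
    simp only [PySem.List.clampIdx]
    rw [if_pos (by omega), if_neg (by omega)]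
    omega
  have hc2 : PySem.List.clampIdx cs.length ((cs.length : Int)) = cs.length := by
    simp only [PySem.List.clampIdx]
    rw [if_neg (by omega)]
    simp
  simp only [PySem.List.slice, hc, hc2]
  rw [List.take_of_length_le (by simp)]
  congr 1
  omega


-- small helper: zipping a list with a mapped copy of itself pairs each element with its image
lemma zip_self_map {α β : Type} (l : List α) (f : α → β) :
    l.zip (l.map f) = l.map (fun x => (x, f x)) := by
  nth_rewrite 1 [← List.map_id l]
  rw [List.zip_map']
  simp

theorem main_eq (s : String) (rl : Int) : create_lcparray s rl = create_lcparray_alt s rl := by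
  simp only [create_lcparray, create_lcparray_alt]
  have hlen : PySem.Str.len s = (s.toList.length : Int) := by
    simp [PySem.Str.len_eq]
  simp only [hlen]
  set cs := s.toList with hcs
  set N := cs.length with hN
  have key_eq : ∀ i : Int, 0 ≤ i → PySem.Str.slice s (some i) none = String.ofList (cs.drop i.toNat) := by
    intro i hi
    show String.ofList (PySem.List.slice cs (some i) none) = _
    rw [PySem.List.slice_from cs hi]
  -- Step 1: A's suffix-array build loop is the reverse of the index map
  rw [PySem.List.foldl_append_singleton_eq_map, List.nil_append]
  have hsfx : (PySem.List.pyRange 1 ((N:Int) + 1) 1).map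
        (fun i => ((N:Int) - i, PySem.Str.slice s (some (-i)) (some (N:Int)))) =
      ((PySem.List.pyRange 0 (N:Int) 1).map
        (fun i => (i, PySem.Str.slice s (some i) none))).reverse := by
    rw [List.map_congr_left (g := fun i => ((N:Int) - i, PySem.Str.slice s (some ((N:Int) - i)) none)) ?_]
    · apply List.ext_getElem
      · simp [PySem.List.length_pyRange_one]
      · intro k h1 h2
        have hk : k < N := by
          simpa [PySem.List.length_pyRange_one] using h1
        simp only [List.getElem_map, List.getElem_reverse, PySem.List.getElem_pyRange_one,
          List.length_map, PySem.List.length_pyRange_one]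
        rw [show (N:Int) - (1 + (k:Int)) = 0 + ((((N:Int) - 0).toNat - 1 - k : Nat) : Int) by omega]
    · intro i hi
      rw [PySem.List.mem_pyRange_one] at hi
      have h1 : PySem.Str.slice s (some (-i)) (some (N:Int)) = String.ofList (cs.drop ((N:Int) - i).toNat) := by
        show String.ofList (PySem.List.slice cs (some (-i)) (some (N:Int))) = _
        rw [slice_neg_eq cs i (by omega) (by omega)]
      simp only [h1, key_eq ((N:Int) - i) (by omega)]
  rw [hsfx]
  -- Step 2: sorting those pairs by the suffix string = mapping the sorted index array
  set saB := PySem.List.sorted (PySem.List.pyRange 0 (N:Int) 1)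
      (fun i => PySem.Str.slice s (some i) none) false with hsaB
  have hmemB : ∀ i ∈ saB, 0 ≤ i ∧ i < (N:Int) := by
    intro i hi
    rw [hsaB, PySem.List.mem_sorted, PySem.List.mem_pyRange_one] at hi
    omega
  have hinj : ∀ i j : Int, 0 ≤ i → i < (N:Int) → 0 ≤ j → j < (N:Int) →
      PySem.Str.slice s (some i) none = PySem.Str.slice s (some j) none → i = j := by
    intro i j hi1 hi2 hj1 hj2 heq
    rw [key_eq i hi1, key_eq j hj1] at heq
    have := congrArg (fun t => t.toList.length) heq
    simp only [String.toList_ofList, List.length_drop] at this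
    omega
  have hsorted1 : PySem.List.sorted
        (((PySem.List.pyRange 0 (N:Int) 1).map (fun i => (i, PySem.Str.slice s (some i) none))).reverse)
        (fun p : Int × String => p.2) false =
      saB.map (fun i => (i, PySem.Str.slice s (some i) none)) := by
    apply PySem.List.sorted_eq_of_perm_of_pairwise_lt
    · exact ((PySem.List.sorted_perm _ _ _).map _).trans (List.reverse_perm _).symm
    · rw [List.pairwise_map]
      have hnd : saB.Nodup := by
        rw [hsaB]
        exact ((PySem.List.sorted_perm _ _ _).nodup_iff).mpr (PySem.List.nodup_pyRange_one 0 _)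
      have hple : saB.Pairwise (fun i j => (fun i => PySem.Str.slice s (some i) none) i ≤
          (fun i => PySem.Str.slice s (some i) none) j) := PySem.List.sorted_pairwise _ _
      refine List.Pairwise.imp_of_mem ?_ (hple.and hnd)
      intro a b ha hb hab
      obtain ⟨hle, hne⟩ := hab
      obtain ⟨ha1, ha2⟩ := hmemB a ha
      obtain ⟨hb1, hb2⟩ := hmemB b hb
      exact lt_of_le_of_ne hle (fun h => hne (hinj a b ha1 ha2 hb1 hb2 h))
  rw [hsorted1]
  -- Step 3: A's pair loop becomes a flatMap of emitted ranges over adjacent pairs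
  simp only [whileA_zero]
  rw [PySem.List.foldl_append_eq_flatMap, List.nil_append]
  rw [flatMap_pyRange_adj (List.map (fun i => (i, PySem.Str.slice s (some i) none)) saB) (0, "")
    (fun p q => List.map (fun k => (p.1, k, q.1))
      (PySem.List.pyRange (max rl 1) (lcpChars p.2.toList q.2.toList + 1) 1))]
  -- rewrite B's sa[1:] slice as drop 1, and the A-side zip of mapped lists
  have hslice : PySem.List.slice saB (some 1) none = saB.drop 1 := by
    rw [PySem.List.slice_from saB (by omega)]
    rfl
  rw [hslice]
  rw [show (List.map (fun i => (i, PySem.Str.slice s (some i) none)) saB).drop 1 =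
      List.map (fun i => (i, PySem.Str.slice s (some i) none)) (saB.drop 1) from (List.map_drop ..).symm]
  rw [List.zip_map, List.flatMap_map]
  simp only [Prod.map_fst, Prod.map_snd, ge_iff_le]
  -- name the shared pieces
  set pairsB := saB.zip (List.drop 1 saB) with hpairs
  set lcps := pairsB.map (fun ab => lcpChars (PySem.Str.slice s (some ab.1) none).toList
      (PySem.Str.slice s (some ab.2) none).toList) with hlcps
  set lo := max rl 1 with hlo
  set hi := PySem.List.maxD lcps (fun x => x) 0 with hhi
  set R := PySem.List.pyRange hi (lo - 1) (-1) with hR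
  set E := pairsB.flatMap (fun a => (PySem.List.pyRange lo
      (lcpChars (PySem.Str.slice s (some a.1) none).toList
        (PySem.Str.slice s (some a.2) none).toList + 1) 1).map (fun k => (a.1, k, a.2))) with hE
  -- keys occurring in E all lie in the countdown range R
  have hcover : ∀ e ∈ E, e.2.1 ∈ R := by
    intro e he
    obtain ⟨q, hq, he2⟩ := List.mem_flatMap.mp he
    obtain ⟨k, hk, rfl⟩ := List.mem_map.mp he2
    rw [PySem.List.mem_pyRange_one] at hk
    rw [hR, PySem.List.mem_pyRange_neg_one]
    have hm : (fun ab : Int × Int => lcpChars (PySem.Str.slice s (some ab.1) none).toList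
        (PySem.Str.slice s (some ab.2) none).toList) q ∈ lcps := by
      rw [hlcps]; exact List.mem_map_of_mem hq
    have hle := le_maxD_of_mem lcps _ 0 hm
    simp only at hle hk ⊢
    omega
  have hRsorted : R.Pairwise (· > ·) := by
    rw [hR, PySem.List.pyRange_neg_one_eq_reverse, List.pairwise_reverse]
    simpa using PySem.List.pairwise_lt_pyRange_one (lo - 1 + 1) (hi + 1)
  rw [sorted_rev_eq_buckets (fun t => t.2.1) E R hRsorted hcover]
  -- B's two nested loops: bucket emission as a flatMap of filtered maps
  simp only [PySem.List.foldl_append_ite]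
  rw [PySem.List.foldl_append_eq_flatMap, List.nil_append]
  apply List.flatMap_congr
  intro j hj
  rw [hR, PySem.List.mem_pyRange_neg_one] at hj
  have hjlo : lo ≤ j := by omega
  rw [hE, filter_flatMap, hlcps, zip_self_map pairsB _, List.filter_map, List.map_map]
  rw [filter_map_eq_flatMap]
  apply List.flatMap_congr
  intro q hq
  rw [List.filter_map]
  simp only [Function.comp_def]
  rw [filter_pyRange_one]
  by_cases hLj : j ≤ lcpChars (PySem.Str.slice s (some q.1) none).toList (PySem.Str.slice s (some q.2) none).toList
  · rw [if_pos ⟨hjlo, by omega⟩, if_pos (by simpa using hLj)]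
    simp
  · rw [if_neg (by intro h; exact hLj (by omega)), if_neg (by simpa using hLj)]
    simp

-- ===== VERDICT (by name: the statement is the Claim_ definition above) =====
theorem create_lcparray_spec : Claim_equal_create_lcparray := by
  intro s rl _
  exact main_eq s rl
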